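-- pv_equiv track=rewrite | github.com/bartlomiejduda/Tools | NEW Tools/E-racer/hash_test.py | calculate_eracer_hash
-- ===== SOURCE A (Python) =====
-- def calculate_eracer_hash(in_filename):
--     len_filename = len(in_filename)
--     curr_char_IDX = 0
--     hash_part_LAST = 0
--     curr_char = ""
--     hash_part3 = 0
--
--     for i in range(len_filename-1):
--         if curr_char_IDX < len_filename:
--             curr_char = int(ord(in_filename[i]))
--             part_hash1 = curr_char + curr_char_IDX
--             part_hash2 = curr_char + 7
--
--             while 1:
--                 hash_part3 = part_hash1 * part_hash2 * (int(ord(in_filename[curr_char_IDX])) + 19) * (int(ord(in_filename[curr_char_IDX])) + curr_char_IDX)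
--                 curr_char_IDX += 1
--                 hash_part_LAST += hash_part3
--                 if curr_char_IDX >= len_filename:
--                     break
--
--             curr_char_IDX = i
--         curr_char_IDX += 1
--
--     conv = int(str(hex(hash_part_LAST))[-8:], 16) # workaround!
--     hash_part_LAST = conv
--
--     OUT_HASH = hash_part_LAST % 0xEE6B2800
--     return OUT_HASH
-- ===== SOURCE B (Python) =====
-- def calculate_eracer_hash(in_filename):
--     codes = [ord(c) for c in in_filename]
--     n = len(codes)
--     # suffix sums of the per-index factor (c_j + 19) * (c_j + j)
--     suffix = [0] * n
--     acc = 0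
--     for j in range(n - 1, -1, -1):
--         acc += (codes[j] + 19) * (codes[j] + j)
--         suffix[j] = acc
--     h = 0
--     for i in range(n - 1):
--         h += (codes[i] + i) * (codes[i] + 7) * suffix[i]
--     # A's int(hex(h)[-8:], 16) "workaround" keeps the low 32 bits (h >= 0 here)
--     return (h % (1 << 32)) % 0xEE6B2800
-- ===== Notes on version B (the rewrite author's own statement) =====
-- stated objective: faster
-- what changed: One linear pass over precomputed suffix sums of (c_j+19)*(c_j+j) replaces A's restarting inner while-loop, and the hex-string round-trip int(hex(h)[-8:],16) is replaced by h % 2**32.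
-- outside the precondition, e.g. on calculate_eracer_hash('aa'): A raises ValueError, B returns 228190560
import Mathlib
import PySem

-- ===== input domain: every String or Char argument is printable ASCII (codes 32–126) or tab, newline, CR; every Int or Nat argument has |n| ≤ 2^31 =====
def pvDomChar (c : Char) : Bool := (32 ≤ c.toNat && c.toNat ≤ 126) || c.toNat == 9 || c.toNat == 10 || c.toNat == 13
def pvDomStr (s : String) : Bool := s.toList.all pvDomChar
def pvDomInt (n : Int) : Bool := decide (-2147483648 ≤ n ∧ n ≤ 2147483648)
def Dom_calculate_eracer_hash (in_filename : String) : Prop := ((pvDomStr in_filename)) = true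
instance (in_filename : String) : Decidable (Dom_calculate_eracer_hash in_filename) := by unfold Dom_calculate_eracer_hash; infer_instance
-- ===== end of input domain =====

-- B replaces A's restarting inner while-loop by one linear pass over precomputed suffix
-- sums, and A's hex-string round-trip int(hex(h)[-8:],16) by h % 2**32 (objective: faster).

-- ===== PORT A =====
-- ord(in_filename[i]); A only evaluates it at in-range indices (exact there; getD 0 unreachable)
def pvOrdAt (cs : List Char) (i : Nat) : Int :=
  ((PySem.List.pyGet? cs (Int.ofNat i)).map (fun c => (c.toNat : Int))).getD 0

-- the inner 'while 1' loop of A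
def pvInner (cs : List Char) (n : Nat) (p1 p2 : Int) (idx : Nat) (acc : Int) : Nat × Int :=
  let h3 := p1 * p2 * (pvOrdAt cs idx + 19) * (pvOrdAt cs idx + (idx : Int))
  let idx' := idx + 1
  let acc' := acc + h3
  if _h : n ≤ idx' then (idx', acc')
  else pvInner cs n p1 p2 idx' acc'
termination_by n - idx

-- the body of A's 'for i in range(len_filename-1)' loop; state = (curr_char_IDX, hash_part_LAST)
def pvF (cs : List Char) : Nat × Int → Nat → Nat × Int := fun st i =>
  if st.1 < cs.length then
    let c := pvOrdAt cs i
    let r := pvInner cs cs.length (c + (i : Int)) (c + 7) st.1 st.2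
    (i + 1, r.2)          -- curr_char_IDX = i; curr_char_IDX += 1
  else (st.1 + 1, st.2)

-- hex(h) for h ≥ 0 is '0x' followed by lowercase hex digits, most significant first
def pvHexDigit (d : Nat) : Char :=
  match d with
  | 0 => '0' | 1 => '1' | 2 => '2' | 3 => '3' | 4 => '4' | 5 => '5' | 6 => '6' | 7 => '7'
  | 8 => '8' | 9 => '9' | 10 => 'a' | 11 => 'b' | 12 => 'c' | 13 => 'd' | 14 => 'e' | _ => 'f'

-- little-endian hex digits of m (empty for 0)
def pvToHexRev (m : Nat) : List Char :=
  if _h : m = 0 then [] else pvHexDigit (m % 16) :: pvToHexRev (m / 16)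
decreasing_by exact Nat.div_lt_self (Nat.pos_of_ne_zero _h) (by norm_num)

-- str(hex(h)): exact port of Python's hex() builtin
def pvHexStrInt (h : Int) : List Char :=
  if h < 0 then '-' :: '0' :: 'x' :: (pvToHexRev (-h).toNat).reverse
  else '0' :: 'x' :: (if h = 0 then ['0'] else (pvToHexRev h.toNat).reverse)

-- value of one hex digit as int(·,16) accepts it from hex() output (lowercase); none = invalid char
def pvHexVal? (c : Char) : Option Nat :=
  match c with
  | '0' => some 0 | '1' => some 1 | '2' => some 2 | '3' => some 3 | '4' => some 4
  | '5' => some 5 | '6' => some 6 | '7' => some 7 | '8' => some 8 | '9' => some 9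
  | 'a' => some 10 | 'b' => some 11 | 'c' => some 12 | 'd' => some 13 | 'e' => some 14
  | 'f' => some 15 | _ => none

def pvParseGo (l : List Char) (acc : Nat) : Option Nat :=
  match l with
  | [] => some acc
  | c :: r => match pvHexVal? c with
              | none => none
              | some d => pvParseGo r (acc * 16 + d)

-- int(s, 16) on the strings A feeds it (an optional '0x' prefix, then hex digits); none = ValueError
def pvParseHex? (l : List Char) : Option Nat :=
  if l.take 2 = ['0', 'x'] then
    (if l.drop 2 = [] then none else pvParseGo (l.drop 2) 0)
  else if l = [] then none else pvParseGo l 0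

def calculate_eracer_hash (in_filename : String) : Int :=
  let cs := in_filename.toList
  let n := cs.length
  let st := (List.range (n - 1)).foldl (pvF cs) (0, 0)
  let hx := pvHexStrInt st.2
  let last8 := hx.drop (hx.length - 8)                           -- [-8:]
  let conv : Int := ((pvParseHex? last8).map Int.ofNat).getD 0   -- none = ValueError, excluded by Pre_
  PySem.Int.mod conv 4000000000

-- ===== PORT B =====
-- list of suffix sums of (codes[j]+19)*(codes[j]+j), as Source B fills it right-to-left
def pvSuffix (cs : List Char) (j : Nat) : List Int :=
  match cs with
  | [] => []
  | c :: rest =>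
      let tail := pvSuffix rest (j + 1)
      (((c.toNat : Int) + 19) * ((c.toNat : Int) + (j : Int)) + tail.headD 0) :: tail

-- for i in range(n-1): h += (codes[i]+i)*(codes[i]+7)*suffix[i]
def pvLin (cs : List Char) (S : List Int) (i : Nat) : Int :=
  match cs, S with
  | _ :: [], _ => 0
  | c :: rest, s :: srest =>
      ((c.toNat : Int) + (i : Int)) * ((c.toNat : Int) + 7) * s + pvLin rest srest (i + 1)
  | _, _ => 0

def calculate_eracer_hash_alt (in_filename : String) : Int :=
  let cs := in_filename.toList
  let h := pvLin cs (pvSuffix cs 0) 0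
  PySem.Int.mod (PySem.Int.mod h 4294967296) 4000000000

-- ===== PRECONDITION & SPEC =====
-- spec-level value of A's accumulated hash_part_LAST, written as the direct double sum
def pvSfx (l : List Int) (j : Nat) : Int :=
  match l with
  | [] => 0
  | c :: r => (c + 19) * (c + (j : Int)) + pvSfx r (j + 1)

def pvRaw (l : List Int) (i : Nat) : Int :=
  match l with
  | [] => 0
  | _ :: [] => 0
  | c :: rest => (c + (i : Int)) * (c + 7) * pvSfx (c :: rest) i + pvRaw rest (i + 1)

def pvRawHash (s : String) : Int := pvRaw (s.toList.map (fun c => (c.toNat : Int))) 0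

-- Pre_ excludes exactly the inputs on which A raises ValueError: those whose accumulated
-- hash has exactly 7 hex digits, so that int(hex(h)[-8:], 16) raises ValueError on the letter x plus 7 digits.
def Pre_calculate_eracer_hash (in_filename : String) : Prop :=
  ¬ (16 ^ 6 ≤ pvRawHash in_filename ∧ pvRawHash in_filename < 16 ^ 7)
instance (in_filename : String) : Decidable (Pre_calculate_eracer_hash in_filename) := by
  unfold Pre_calculate_eracer_hash; infer_instance

def pvWitness_calculate_eracer_hash : String := "zz"

def Spec_calculate_eracer_hash (in_filename : String) (out : Int) : Prop :=
  out = calculate_eracer_hash_alt in_filename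
instance (in_filename : String) (out : Int) : Decidable (Spec_calculate_eracer_hash in_filename out) := by
  unfold Spec_calculate_eracer_hash; infer_instance

-- ===== CLAIM (what is proved, stated in full; the proofs are below) =====
def Claim_equal_calculate_eracer_hash : Prop := ∀ (in_filename : String), Dom_calculate_eracer_hash in_filename → Pre_calculate_eracer_hash in_filename → Spec_calculate_eracer_hash in_filename (calculate_eracer_hash in_filename)

-- ===== LEMMAS AND PROOFS =====

-- ---- B side: suffix-sum pass computes the double sum pvRaw ----

theorem pvSuffix_headD (cs : List Char) (j : Nat) :
    (pvSuffix cs j).headD 0 = pvSfx (cs.map (fun c => (c.toNat : Int))) j := by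
  induction cs generalizing j with
  | nil => simp [pvSuffix, pvSfx]
  | cons c rest ih => simp only [pvSuffix, pvSfx, List.map_cons, List.headD_cons]; rw [ih]

theorem pvLin_eq_pvRaw (cs : List Char) (j : Nat) :
    pvLin cs (pvSuffix cs j) j = pvRaw (cs.map (fun c => (c.toNat : Int))) j := by
  induction cs generalizing j with
  | nil => simp [pvSuffix, pvLin, pvRaw]
  | cons c rest ih =>
    cases rest with
    | nil => simp [pvSuffix, pvLin, pvRaw]
    | cons d rest' =>
      show ((c.toNat : Int) + (j : Int)) * ((c.toNat : Int) + 7) *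
            ((((c.toNat : Int) + 19) * ((c.toNat : Int) + (j : Int)) +
              (pvSuffix (d :: rest') (j + 1)).headD 0)) +
            pvLin (d :: rest') (pvSuffix (d :: rest') (j + 1)) (j + 1) = _
      rw [pvSuffix_headD, ih]
      show _ = ((c.toNat : Int) + (j : Int)) * ((c.toNat : Int) + 7) *
            pvSfx ((c :: d :: rest').map (fun c => (c.toNat : Int))) j +
            pvRaw ((d :: rest').map (fun c => (c.toNat : Int))) (j + 1)
      simp [pvSfx]

-- ---- A side: the nested loops compute pvRaw ----

theorem pvOrdAt_drop (cs : List Char) (i : Nat) (c : Char) (l : List Char)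
    (h : cs.drop i = c :: l) : pvOrdAt cs i = (c.toNat : Int) := by
  have hi : cs[i]? = some c := by
    rw [← List.head?_drop, h]; rfl
  simp [pvOrdAt, PySem.List.pyGet?_natCast, hi]

theorem pvInner_eq (cs : List Char) (l : List Char) (idx : Nat) (p1 p2 acc : Int)
    (h : cs.drop idx = l) (hne : l ≠ []) :
    pvInner cs cs.length p1 p2 idx acc
      = (cs.length, acc + p1 * p2 * pvSfx (l.map (fun c => (c.toNat : Int))) idx) := by
  induction l generalizing idx acc with
  | nil => exact absurd rfl hne
  | cons c rest ih =>
    have hC : pvOrdAt cs idx = (c.toNat : Int) := pvOrdAt_drop cs idx c rest h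
    rw [pvInner]
    cases rest with
    | nil =>
      have hlen : cs.length = idx + 1 := by
        have := congrArg List.length h; simp at this; omega
      have hn : cs.length ≤ idx + 1 := by omega
      simp only [hC, hn, dif_pos, Prod.mk.injEq]
      refine ⟨by omega, ?_⟩
      simp [pvSfx]; ring
    | cons d rest' =>
      have hlen : idx + 2 ≤ cs.length := by
        have := congrArg List.length h; simp at this; omega
      have hn : ¬ cs.length ≤ idx + 1 := by omega
      have hdrop : cs.drop (idx + 1) = d :: rest' := by
        have : cs.drop (idx + 1) = (cs.drop idx).tail := by
          rw [← List.drop_drop]; simp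
        rw [this, h]; rfl
      simp only [hn, dif_neg, not_false_iff, hC]
      rw [ih (idx + 1) _ hdrop (by simp)]
      simp only [Prod.mk.injEq, true_and]
      simp [pvSfx]; ring

theorem pvRaw_cons_cons (a b : Int) (l : List Int) (i : Nat) :
    pvRaw (a :: b :: l) i = (a + (i : Int)) * (a + 7) * pvSfx (a :: b :: l) i + pvRaw (b :: l) (i + 1) := rfl

theorem pvOuter_eq (cs : List Char) (l : List Char) (i : Nat) (acc : Int)
    (h : cs.drop i = l) :
    (List.range' i (l.length - 1)).foldl (pvF cs) (i, acc)
      = (i + (l.length - 1), acc + pvRaw (l.map (fun c => (c.toNat : Int))) i) := by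
  induction l generalizing i acc with
  | nil => simp [pvRaw]
  | cons c rest ih =>
    cases rest with
    | nil => simp [pvRaw]
    | cons d rest' =>
      have hi : i < cs.length := by
        have := congrArg List.length h; simp at this; omega
      have hdrop : cs.drop (i + 1) = d :: rest' := by
        have : cs.drop (i + 1) = (cs.drop i).tail := by
          rw [← List.drop_drop]; simp
        rw [this, h]; rfl
      have hC : pvOrdAt cs i = (c.toNat : Int) := pvOrdAt_drop cs i c (d :: rest') h
      have hr : (List.range' i ((c :: d :: rest').length - 1))
          = i :: List.range' (i + 1) ((d :: rest').length - 1) := by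
        simp [List.range'_succ]
      have hstep : pvF cs (i, acc) i
          = (i + 1, acc + ((c.toNat : Int) + (i : Int)) * ((c.toNat : Int) + 7) *
              pvSfx ((c :: d :: rest').map (fun x => (x.toNat : Int))) i) := by
        simp only [pvF, hi, if_pos]
        rw [pvInner_eq cs (c :: d :: rest') i _ _ _ h (by simp), hC]
      rw [hr, List.foldl_cons, hstep, ih (i + 1) _ hdrop]
      simp only [Prod.mk.injEq]
      refine ⟨by simp; omega, ?_⟩
      show _ = acc + pvRaw ((c :: d :: rest').map (fun x => (x.toNat : Int))) i
      simp only [List.map_cons]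
      rw [pvRaw_cons_cons]
      ring

-- ---- nonnegativity of the accumulated hash ----

theorem pvSfx_nonneg (cs : List Char) (j : Nat) :
    0 ≤ pvSfx (cs.map (fun c => (c.toNat : Int))) j := by
  induction cs generalizing j with
  | nil => simp [pvSfx]
  | cons c rest ih =>
    simp only [List.map_cons, pvSfx]
    have h1 : (0 : Int) ≤ ((c.toNat : Int) + 19) * ((c.toNat : Int) + (j : Int)) := by
      apply mul_nonneg <;> positivity
    have := ih (j + 1); push_cast at this ⊢; omega

theorem pvRaw_nonneg (cs : List Char) (j : Nat) :
    0 ≤ pvRaw (cs.map (fun c => (c.toNat : Int))) j := by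
  induction cs generalizing j with
  | nil => simp [pvRaw]
  | cons c rest ih =>
    cases rest with
    | nil => simp [pvRaw]
    | cons d rest' =>
      show 0 ≤ ((c.toNat : Int) + (j : Int)) * ((c.toNat : Int) + 7) *
          pvSfx ((c :: d :: rest').map (fun x => (x.toNat : Int))) j +
          pvRaw ((d :: rest').map (fun x => (x.toNat : Int))) (j + 1)
      have h1 : (0 : Int) ≤ ((c.toNat : Int) + (j : Int)) * ((c.toNat : Int) + 7) *
          pvSfx ((c :: d :: rest').map (fun x => (x.toNat : Int))) j := by
        apply mul_nonneg
        · apply mul_nonneg <;> positivity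
        · exact pvSfx_nonneg (c :: d :: rest') j
      have h2 := ih (j + 1)
      omega

-- ---- hex round-trip: int(hex(m)[-8:], 16) = m % 2^32 unless m has exactly 7 hex digits ----

def pvValRev (l : List Char) : Nat :=
  match l with
  | [] => 0
  | c :: r => (pvHexVal? c).getD 0 + 16 * pvValRev r

theorem pvHexVal?_pvHexDigit (d : Nat) (h : d < 16) : pvHexVal? (pvHexDigit d) = some d := by
  interval_cases d <;> rfl

theorem pvToHexRev_valid (m : Nat) : ∀ c ∈ pvToHexRev m, (pvHexVal? c).isSome := by
  induction m using Nat.strong_induction_on with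
  | _ m ih =>
    rw [pvToHexRev]
    by_cases h : m = 0
    · simp [h]
    · simp only [h, dif_neg, not_false_iff, List.mem_cons]
      rintro c (rfl | hc)
      · rw [pvHexVal?_pvHexDigit _ (Nat.mod_lt _ (by norm_num))]; rfl
      · exact ih (m / 16) (Nat.div_lt_self (Nat.pos_of_ne_zero h) (by norm_num)) c hc

theorem pvValRev_toHexRev (m : Nat) : pvValRev (pvToHexRev m) = m := by
  induction m using Nat.strong_induction_on with
  | _ m ih =>
    rw [pvToHexRev]
    by_cases h : m = 0
    · simp [h, pvValRev]
    · simp only [h, dif_neg, not_false_iff, pvValRev]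
      rw [pvHexVal?_pvHexDigit _ (Nat.mod_lt _ (by norm_num)),
        ih (m / 16) (Nat.div_lt_self (Nat.pos_of_ne_zero h) (by norm_num))]
      simp [Nat.mod_add_div]

theorem pvValRev_take (k m : Nat) : pvValRev ((pvToHexRev m).take k) = m % 16 ^ k := by
  induction k generalizing m with
  | zero => simp [pvValRev, Nat.mod_one]
  | succ k ih =>
    rw [pvToHexRev]
    by_cases h : m = 0
    · simp [h, pvValRev]
    · simp only [h, dif_neg, not_false_iff, List.take_succ_cons, pvValRev]
      rw [pvHexVal?_pvHexDigit _ (Nat.mod_lt _ (by norm_num)), ih]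
      have h16 : (16 : Nat) ^ (k + 1) = 16 * 16 ^ k := by ring
      rw [h16, Nat.mod_mul]
      simp only [Option.getD_some]

theorem pvToHexRev_len_le (k m : Nat) (h : m < 16 ^ k) : (pvToHexRev m).length ≤ k := by
  induction k generalizing m with
  | zero => interval_cases m; rw [pvToHexRev]; simp
  | succ k ih =>
    rw [pvToHexRev]
    by_cases h0 : m = 0
    · simp [h0]
    · simp only [h0, dif_neg, not_false_iff, List.length_cons]
      have : m / 16 < 16 ^ k := by
        rw [Nat.div_lt_iff_lt_mul (by norm_num)]
        calc m < 16 ^ (k + 1) := h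
        _ = 16 ^ k * 16 := by ring
      have := ih (m / 16) this
      omega

theorem pvToHexRev_len_ge (k m : Nat) (h : 16 ^ k ≤ m) : k < (pvToHexRev m).length := by
  induction k generalizing m with
  | zero =>
    rw [pvToHexRev]
    have : m ≠ 0 := by simpa using Nat.one_le_iff_ne_zero.mp h
    simp [this]
  | succ k ih =>
    rw [pvToHexRev]
    have h0 : m ≠ 0 := by have h1 : 0 < (16:Nat) ^ (k + 1) := pow_pos (by norm_num) _; omega
    simp only [h0, dif_neg, not_false_iff, List.length_cons]
    have : 16 ^ k ≤ m / 16 := by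
      rw [Nat.le_div_iff_mul_le (by norm_num)]
      calc 16 ^ k * 16 = 16 ^ (k + 1) := by ring
      _ ≤ m := h
    have := ih (m / 16) this
    omega

theorem pvParseGo_valid (l : List Char) (acc : Nat) (h : ∀ c ∈ l, (pvHexVal? c).isSome) :
    pvParseGo l acc = some (l.foldl (fun a c => a * 16 + (pvHexVal? c).getD 0) acc) := by
  induction l generalizing acc with
  | nil => rfl
  | cons c r ih =>
    have hc := h c (by simp)
    obtain ⟨d, hd⟩ := Option.isSome_iff_exists.mp hc
    rw [pvParseGo, hd]
    simp only [List.foldl_cons, hd, Option.getD_some]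
    exact ih _ (fun x hx => h x (by simp [hx]))

theorem pvFoldl_reverse (r : List Char) (acc : Nat) :
    r.reverse.foldl (fun a c => a * 16 + (pvHexVal? c).getD 0) acc
      = acc * 16 ^ r.length + pvValRev r := by
  induction r generalizing acc with
  | nil => simp [pvValRev]
  | cons c r ih =>
    simp only [List.reverse_cons, List.foldl_append, List.foldl_cons, List.foldl_nil, ih,
      List.length_cons, pvValRev]
    ring

theorem pvParseHex?_no_prefix (l : List Char) (h : ∀ c ∈ l, (pvHexVal? c).isSome)
    (hne : l ≠ []) : pvParseHex? l = pvParseGo l 0 := by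
  rw [pvParseHex?]
  have : l.take 2 ≠ ['0', 'x'] := by
    intro hx
    have : 'x' ∈ l := List.take_subset 2 l (by rw [hx]; simp)
    have := h 'x' this
    simp [pvHexVal?] at this
  simp [this, hne]

-- end-to-end hex lemma, stated over Nat
theorem pvHexRound (m : Nat) (hpre : ¬ (16 ^ 6 ≤ m ∧ m < 16 ^ 7)) :
    ((pvParseHex? ((pvHexStrInt (m : Int)).drop ((pvHexStrInt (m : Int)).length - 8))).map
      Int.ofNat).getD 0 = ((m % 4294967296 : Nat) : Int) := by
  by_cases h0 : m = 0
  · subst h0; decide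
  · have hneg : ¬ ((m : Int) < 0) := Int.not_lt.mpr (Int.natCast_nonneg m)
    have hz : ¬ ((m : Int) = 0) := by exact_mod_cast h0
    have hx : pvHexStrInt (m : Int) = '0' :: 'x' :: (pvToHexRev m).reverse := by
      simp [pvHexStrInt, hneg, h0]
    rw [hx]
    have hvalid : ∀ c ∈ pvToHexRev m, (pvHexVal? c).isSome := pvToHexRev_valid m
    by_cases hbig : 16 ^ 7 ≤ m
    · have hL : 8 ≤ (pvToHexRev m).length := by
        have := pvToHexRev_len_ge 7 m hbig; omega
      have hlen : ('0' :: 'x' :: (pvToHexRev m).reverse).length - 8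
          = ((pvToHexRev m).length - 8) + 2 := by
        have e : ('0' :: 'x' :: (pvToHexRev m).reverse).length = (pvToHexRev m).length + 2 := by
          simp
        omega
      rw [hlen, List.drop_succ_cons, List.drop_succ_cons]
      have hdr : (pvToHexRev m).reverse.drop ((pvToHexRev m).length - 8)
          = ((pvToHexRev m).take 8).reverse := by
        rw [List.drop_reverse]
        congr 1
        congr 1
        omega
      rw [hdr]
      have hval8 : ∀ c ∈ ((pvToHexRev m).take 8).reverse, (pvHexVal? c).isSome := by
        intro c hc
        exact hvalid c (List.take_subset 8 _ (List.mem_reverse.mp hc))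
      have hne : ((pvToHexRev m).take 8).reverse ≠ [] := by
        intro hcon
        have := congrArg List.length hcon
        simp only [List.length_reverse, List.length_take, List.length_nil] at this
        omega
      rw [pvParseHex?_no_prefix _ hval8 hne, pvParseGo_valid _ _ hval8, pvFoldl_reverse,
        pvValRev_take]
      simp
    · have h6 : m < 16 ^ 6 := by
        have e6 : (16 : Nat) ^ 6 = 16777216 := by norm_num
        have e7 : (16 : Nat) ^ 7 = 268435456 := by norm_num
        rw [e6]; rw [e6, e7] at hpre; rw [e7] at hbig; omega
      have hL6 : (pvToHexRev m).length ≤ 6 := pvToHexRev_len_le 6 m h6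
      have hL1 : 0 < (pvToHexRev m).length := by
        have := pvToHexRev_len_ge 0 m (by omega)
        omega
      have hlen : ('0' :: 'x' :: (pvToHexRev m).reverse).length - 8 = 0 := by
        have e : ('0' :: 'x' :: (pvToHexRev m).reverse).length = (pvToHexRev m).length + 2 := by
          simp
        omega
      rw [hlen, List.drop_zero]
      have hne : (pvToHexRev m).reverse ≠ [] := by
        intro hcon
        have := congrArg List.length hcon
        simp only [List.length_reverse, List.length_nil] at this
        omega
      have hvr : ∀ c ∈ (pvToHexRev m).reverse, (pvHexVal? c).isSome := by
        intro c hc; exact hvalid c (List.mem_reverse.mp hc)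
      rw [pvParseHex?]
      have htake : ('0' :: 'x' :: (pvToHexRev m).reverse).take 2 = ['0', 'x'] := rfl
      rw [if_pos htake]
      have hdrop2 : ('0' :: 'x' :: (pvToHexRev m).reverse).drop 2 = (pvToHexRev m).reverse := rfl
      rw [hdrop2, if_neg hne, pvParseGo_valid _ _ hvr, pvFoldl_reverse, pvValRev_toHexRev]
      have : m % 4294967296 = m := Nat.mod_eq_of_lt (by omega)
      rw [this]
      simp

theorem pvModCast (m : Nat) : PySem.Int.mod ((m : Int)) 4294967296 = ((m % 4294967296 : Nat) : Int) := by
  rw [PySem.Int.mod_eq_emod_of_pos (by norm_num)]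
  push_cast
  ring

theorem pv_main (s : String) (hpre : Pre_calculate_eracer_hash s) :
    calculate_eracer_hash s = calculate_eracer_hash_alt s := by
  have hA : (List.range (s.toList.length - 1)).foldl (pvF s.toList) (0, 0)
      = (0 + (s.toList.length - 1),
         0 + pvRaw (s.toList.map (fun c => (c.toNat : Int))) 0) := by
    rw [List.range_eq_range']
    exact pvOuter_eq s.toList s.toList 0 0 (by simp)
  have hB : pvLin s.toList (pvSuffix s.toList 0) 0
      = pvRaw (s.toList.map (fun c => (c.toNat : Int))) 0 := pvLin_eq_pvRaw s.toList 0
  have hnn : 0 ≤ pvRaw (s.toList.map (fun c => (c.toNat : Int))) 0 := pvRaw_nonneg s.toList 0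
  have hcast : pvRaw (s.toList.map (fun c => (c.toNat : Int))) 0
      = (((pvRaw (s.toList.map (fun c => (c.toNat : Int))) 0).toNat : Nat) : Int) :=
    (Int.toNat_of_nonneg hnn).symm
  have hpreN : ¬ (16 ^ 6 ≤ (pvRaw (s.toList.map (fun c => (c.toNat : Int))) 0).toNat ∧
      (pvRaw (s.toList.map (fun c => (c.toNat : Int))) 0).toNat < 16 ^ 7) := by
    unfold Pre_calculate_eracer_hash pvRawHash at hpre
    intro ⟨h1, h2⟩
    exact hpre ⟨by omega, by omega⟩
  simp only [calculate_eracer_hash, calculate_eracer_hash_alt, hA, hB]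
  simp only [zero_add]
  rw [hcast, pvHexRound _ hpreN, pvModCast]

-- ===== VERDICT (by name: the statement is the Claim_ definition above) =====
theorem calculate_eracer_hash_spec : Claim_equal_calculate_eracer_hash := by
  intro s _dom hpre
  exact pv_main s hpre
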